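-- pv_equiv track=rewrite | github.com/paul-cvp/ctmc | simulation/markov_models/fit_distribution.py | filter_peaks
-- ===== SOURCE A (Python) =====
-- def filter_peaks(peaks, x, y, max_number):
--     filtered_peaks = []
--     ind = collect_indexes_of_peaks(peaks, x)
--     for i in ind:
--         cnt = 0
--         for j in ind:
--             if y[i] < y[j]:
--                 cnt += 1
--         if cnt < max_number:
--             filtered_peaks.append(x[i])
--     return filtered_peaks
--
-- def collect_indexes_of_peaks(peaks, x):
--     ind = []
--     for i in range(len(peaks)):
--         for j in range(len(x)):
--             if x[j]==peaks[i]: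
--                 ind.append(j)
--     return ind
-- ===== SOURCE B (Python) =====
-- def filter_peaks(peaks, x, y, max_number):
--     pos = {}
--     for j, v in enumerate(x):
--         pos.setdefault(v, []).append(j)
--     ind = [j for p in peaks for j in pos.get(p, [])]
--     ys = sorted((y[i] for i in ind), reverse=True)
--     greater = {}
--     for k, v in enumerate(ys):
--         if v not in greater:
--             greater[v] = k
--     return [x[i] for i in ind if greater[y[i]] < max_number]
-- ===== Notes on version B (the rewrite author's own statement) =====
-- stated objective: faster
-- what changed: B replaces A's two quadratic scans (value-matching scan of x per peak, and a strictly-greater count scan over all peak indices per peak index) by a one-pass value->indices dict over x and a single descending sort of the peak y-values whose first-occurrence positions are exactly the strictly-greater counts.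
import Mathlib
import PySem

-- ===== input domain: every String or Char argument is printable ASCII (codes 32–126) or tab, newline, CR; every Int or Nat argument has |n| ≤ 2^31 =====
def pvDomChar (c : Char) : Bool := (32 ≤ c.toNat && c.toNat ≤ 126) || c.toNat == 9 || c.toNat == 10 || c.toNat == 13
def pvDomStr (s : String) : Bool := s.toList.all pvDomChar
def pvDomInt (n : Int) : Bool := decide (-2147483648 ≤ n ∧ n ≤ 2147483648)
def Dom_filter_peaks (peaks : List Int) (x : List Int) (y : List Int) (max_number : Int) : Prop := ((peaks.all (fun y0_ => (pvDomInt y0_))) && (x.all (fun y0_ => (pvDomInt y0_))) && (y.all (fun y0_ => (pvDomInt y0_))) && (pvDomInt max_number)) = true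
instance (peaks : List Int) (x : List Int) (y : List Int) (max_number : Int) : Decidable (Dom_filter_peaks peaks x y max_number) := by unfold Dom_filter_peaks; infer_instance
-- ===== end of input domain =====

-- B builds a value→indices dict over x in one pass and sorts the matched y-values descending,
-- so each strictly-greater count is the first-occurrence position in that sorted list (asymptotically faster).
-- y[i]/y[j] raise IndexError in Python when a matched index reaches past len(y); Pre_ excludes exactly those inputs
-- (the ports use pyGetD, exact on Pre_).

-- ===== PORT A =====
def collect_indexes_of_peaks (peaks : List Int) (x : List Int) : List Int :=
  (PySem.List.pyRange 0 (peaks.length : Int) 1).foldl (fun ind i =>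
    (PySem.List.pyRange 0 (x.length : Int) 1).foldl (fun ind j =>
      if PySem.List.pyGetD x j 0 == PySem.List.pyGetD peaks i 0 then ind ++ [j] else ind) ind) []

def filter_peaks (peaks : List Int) (x : List Int) (y : List Int) (max_number : Int) : List Int :=
  let ind := collect_indexes_of_peaks peaks x
  ind.foldl (fun fp i =>
    if (ind.foldl (fun cnt j =>
          if PySem.List.pyGetD y i 0 < PySem.List.pyGetD y j 0 then cnt + 1 else cnt) (0 : Int))
        < max_number
    then fp ++ [PySem.List.pyGetD x i 0] else fp) []

-- ===== PORT B =====
def filter_peaks_alt (peaks : List Int) (x : List Int) (y : List Int) (max_number : Int) : List Int :=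
  let pos : PySem.Dict Int (List Int) :=
    (PySem.List.enumerate x 0).foldl
      (fun d jv => d.insert jv.2 (d.getD jv.2 [] ++ [jv.1])) PySem.Dict.empty
  let ind : List Int := peaks.flatMap (fun p => pos.getD p [])
  let ys : List Int :=
    PySem.List.sorted (ind.map (fun i => PySem.List.pyGetD y i 0)) (fun v => v) true
  let greater : PySem.Dict Int Int :=
    (PySem.List.enumerate ys 0).foldl
      (fun d kv => if d.contains kv.2 then d else d.insert kv.2 kv.1) PySem.Dict.empty
  (ind.filter (fun i => decide (greater.getD (PySem.List.pyGetD y i 0) 0 < max_number))).map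
    (fun i => PySem.List.pyGetD x i 0)

-- ===== PRECONDITION & SPEC =====
-- Pre_ excludes exactly the inputs where Python's y[i] raises IndexError: a matched index (x[j] equal to some peak)
-- at or beyond len(y).
def Pre_filter_peaks (peaks : List Int) (x : List Int) (y : List Int) (max_number : Int) : Prop :=
  ∀ j ∈ List.range x.length, x.getD j 0 ∈ peaks → j < y.length
instance (peaks : List Int) (x : List Int) (y : List Int) (max_number : Int) : Decidable (Pre_filter_peaks peaks x y max_number) := by unfold Pre_filter_peaks; infer_instance

def pvWitness_filter_peaks : List Int × List Int × List Int × Int := ([2], [1, 2], [5, 3], 1)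

def Spec_filter_peaks (peaks : List Int) (x : List Int) (y : List Int) (max_number : Int) (out : List Int) : Prop := out = filter_peaks_alt peaks x y max_number
instance (peaks : List Int) (x : List Int) (y : List Int) (max_number : Int) (out : List Int) : Decidable (Spec_filter_peaks peaks x y max_number out) := by unfold Spec_filter_peaks; infer_instance

-- ===== CLAIM (what is proved, stated in full; the proofs are below) =====
def Claim_equal_filter_peaks : Prop := ∀ (peaks : List Int) (x : List Int) (y : List Int) (max_number : Int), Dom_filter_peaks peaks x y max_number → Pre_filter_peaks peaks x y max_number → Spec_filter_peaks peaks x y max_number (filter_peaks peaks x y max_number)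

-- ===== LEMMAS AND PROOFS =====

-- canonical index list: for one peak value p, the indices of x equal to p, in order
def pvH (x : List Int) (p : Int) : List Int :=
  (PySem.List.pyRange 0 (x.length : Int) 1).filter (fun j => PySem.List.pyGetD x j 0 == p)

theorem pv_foldl_app_if {α β : Type} (p : α → Prop) [DecidablePred p] (f : α → β) :
    ∀ (l : List α) (acc : List β),
      l.foldl (fun a z => if p z then a ++ [f z] else a) acc = acc ++ (l.filter (fun z => decide (p z))).map f := by
  intro l
  induction l with
  | nil => intro acc; simp
  | cons h t ih =>
    intro acc
    by_cases hp : p h <;> simp [List.foldl_cons, hp, ih]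

theorem pv_foldl_app_if_bool {α : Type} (p : α → Bool) :
    ∀ (l : List α) (acc : List α),
      l.foldl (fun a z => if p z then a ++ [z] else a) acc = acc ++ l.filter p := by
  intro l
  induction l with
  | nil => intro acc; simp
  | cons h t ih =>
    intro acc
    by_cases hp : p h <;> simp [List.foldl_cons, hp, ih]

theorem pv_foldl_cnt {α : Type} (p : α → Prop) [DecidablePred p] :
    ∀ (l : List α) (c : Int),
      l.foldl (fun c z => if p z then c + 1 else c) c = c + l.countP (fun z => decide (p z)) := by
  intro l
  induction l with
  | nil => intro c; simp
  | cons h t ih =>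
    intro c
    by_cases hp : p h <;> simp [List.foldl_cons, hp, ih, List.countP_cons] <;> push_cast <;> ring

-- A's index collection equals flatMap of pvH
theorem pv_collect_eq (peaks x : List Int) :
    collect_indexes_of_peaks peaks x = peaks.flatMap (pvH x) := by
  unfold collect_indexes_of_peaks
  have hin : ∀ (acc : List Int) (i : Int),
      (PySem.List.pyRange 0 (x.length : Int) 1).foldl (fun ind j =>
        if PySem.List.pyGetD x j 0 == PySem.List.pyGetD peaks i 0 then ind ++ [j] else ind) acc
      = acc ++ pvH x (PySem.List.pyGetD peaks i 0) := by
    intro acc i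
    exact pv_foldl_app_if_bool (fun j => PySem.List.pyGetD x j 0 == PySem.List.pyGetD peaks i 0) _ acc
  calc (PySem.List.pyRange 0 (peaks.length : Int) 1).foldl (fun ind i =>
          (PySem.List.pyRange 0 (x.length : Int) 1).foldl (fun ind j =>
            if PySem.List.pyGetD x j 0 == PySem.List.pyGetD peaks i 0 then ind ++ [j] else ind) ind) []
      = (PySem.List.pyRange 0 (peaks.length : Int) 1).foldl (fun ind i =>
          ind ++ pvH x (PySem.List.pyGetD peaks i 0)) [] := by
        apply List.foldl_ext
        intro a b _; exact hin a b
    _ = (PySem.List.pyRange 0 (peaks.length : Int) 1).flatMap (fun i => pvH x (PySem.List.pyGetD peaks i 0)) := by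
        simpa using PySem.List.foldl_append_eq_flatMap (fun i => pvH x (PySem.List.pyGetD peaks i 0)) _ []
    _ = ((PySem.List.pyRange 0 (peaks.length : Int) 1).map (fun i => PySem.List.pyGetD peaks i 0)).flatMap (pvH x) := (List.flatMap_map _ _ _).symm
    _ = peaks.flatMap (pvH x) := by rw [PySem.List.map_pyGetD_pyRange_zero' peaks (0 : Int)]

-- B's dict fold: getD of the accumulated dict is the filtered index list
theorem pv_pos_getD :
    ∀ (pairs : List (Int × Int)) (d : PySem.Dict Int (List Int)) (p : Int),
      (pairs.foldl (fun d jv => d.insert jv.2 (d.getD jv.2 [] ++ [jv.1])) d).getD p []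
      = d.getD p [] ++ (pairs.filter (fun jv => jv.2 == p)).map (·.1) := by
  intro pairs
  induction pairs with
  | nil => intro d p; simp
  | cons h t ih =>
    intro d p
    simp only [List.foldl_cons, ih]
    rw [PySem.Dict.getD_insert]
    by_cases hp : p = h.2
    · simp [hp]
    · have : (h.2 == p) = false := by simp [beq_iff_eq]; omega
      simp [hp, this]

theorem pv_enum_filt (x : List Int) (p : Int) :
    ((PySem.List.enumerate x 0).filter (fun jv => jv.2 == p)).map (·.1) = pvH x p := by
  rw [PySem.List.enumerate_eq_map_pyRange (d := 0)]
  rw [List.filter_map, List.map_map]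
  simp [pvH, Function.comp_def]


-- first-occurrence fold preserves keys already present
theorem pv_fo_pres :
    ∀ (l : List Int) (s : Int) (d : PySem.Dict Int Int) (v : Int), d.contains v = true →
      ((PySem.List.enumerate l s).foldl (fun d kv => if d.contains kv.2 then d else d.insert kv.2 kv.1) d).getD v 0
      = d.getD v 0 := by
  intro l
  induction l with
  | nil => intro s d v _; simp [PySem.List.enumerate_nil]
  | cons h t ih =>
    intro s d v hv
    rw [PySem.List.enumerate_cons, List.foldl_cons]
    by_cases hc : d.contains h = true
    · simp only [hc, if_true]; exact ih _ _ _ hv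
    · have hne : v ≠ h := by intro he; simp [← he, hv] at hc
      simp only [hc, if_false, Bool.false_eq_true]
      rw [ih (s+1) _ v (by rw [PySem.Dict.contains_insert]; simp [hv])]
      rw [PySem.Dict.getD_insert]
      simp [hne]

-- first-occurrence fold: value of a fresh key is its first index
theorem pv_fo_first :
    ∀ (l : List Int) (s : Int) (d : PySem.Dict Int Int) (v : Int), v ∈ l → d.contains v = false →
      ((PySem.List.enumerate l s).foldl (fun d kv => if d.contains kv.2 then d else d.insert kv.2 kv.1) d).getD v 0
      = s + (l.idxOf v : Int) := by
  intro l
  induction l with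
  | nil => intro s d v hv; simp at hv
  | cons h t ih =>
    intro s d v hv hc
    rw [PySem.List.enumerate_cons, List.foldl_cons]
    by_cases he : v = h
    · subst he
      simp only [hc, if_false, Bool.false_eq_true]
      rw [pv_fo_pres t (s+1) _ v (by rw [PySem.Dict.contains_insert]; simp)]
      rw [PySem.Dict.getD_insert]
      simp [List.idxOf_cons_self]
    · have hvt : v ∈ t := by cases hv with | head => exact absurd rfl he | tail _ h' => exact h'
      have hidx : (h :: t).idxOf v = t.idxOf v + 1 := by
        simp [List.idxOf_cons, beq_iff_eq, Ne.symm he]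
      by_cases hch : d.contains h = true
      · simp only [hch, if_true]
        rw [ih (s+1) d v hvt hc, hidx]; push_cast; ring
      · simp only [hch, if_false, Bool.false_eq_true]
        have : (d.insert h s).contains v = false := by
          rw [PySem.Dict.contains_insert]; simp [hc, he]
        rw [ih (s+1) _ v hvt this, hidx]; push_cast; ring

-- in a descending list, the first index of v counts the elements strictly greater than v
theorem pv_idxOf_countP :
    ∀ (l : List Int), l.Pairwise (fun a b => b ≤ a) → ∀ v ∈ l,
      l.idxOf v = l.countP (fun w => decide (v < w)) := by
  intro l
  induction l with
  | nil => intro _ v hv; simp at hv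
  | cons h t ih =>
    intro hp v hv
    have hp1 : ∀ w ∈ t, w ≤ h := (List.pairwise_cons.mp hp).1
    have hp2 : t.Pairwise (fun a b => b ≤ a) := (List.pairwise_cons.mp hp).2
    by_cases he : v = h
    · subst he
      have : t.countP (fun w => decide (v < w)) = 0 := by
        rw [List.countP_eq_zero]
        intro w hw; simp; exact hp1 w hw
      simp [List.idxOf_cons_self, List.countP_cons, this]
    · have hvt : v ∈ t := by cases hv with | head => exact absurd rfl he | tail _ h' => exact h'
      have hvh : v < h := lt_of_le_of_ne (hp1 v hvt) he
      have hidx : (h :: t).idxOf v = t.idxOf v + 1 := by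
        simp [List.idxOf_cons, beq_iff_eq, Ne.symm he]
      rw [hidx, List.countP_cons, ih hp2 v hvt]
      simp [hvh]

-- A's strictly-greater count of i equals the first-occurrence position of y[i] in the descending sort
theorem pv_cnt_eq (y : List Int) (ind : List Int) (i : Int) (hi : i ∈ ind) :
    ind.foldl (fun cnt j => if PySem.List.pyGetD y i 0 < PySem.List.pyGetD y j 0 then cnt + 1 else cnt) (0 : Int)
    = ((PySem.List.enumerate (PySem.List.sorted (ind.map (fun i => PySem.List.pyGetD y i 0)) (fun v => v) true) 0).foldl
        (fun d kv => if d.contains kv.2 then d else d.insert kv.2 kv.1) PySem.Dict.empty).getD (PySem.List.pyGetD y i 0) 0 := by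
  set v : Int := PySem.List.pyGetD y i 0 with hv
  set m : List Int := ind.map (fun i => PySem.List.pyGetD y i 0) with hm
  set ys : List Int := PySem.List.sorted m (fun v => v) true with hys
  have hvm : v ∈ m := by rw [hm]; exact List.mem_map_of_mem hi
  have hvys : v ∈ ys := (PySem.List.mem_sorted m (fun v => v) true v).mpr hvm
  have h1 : ind.foldl (fun cnt j => if v < PySem.List.pyGetD y j 0 then cnt + 1 else cnt) (0 : Int)
      = (ind.countP (fun j => decide (v < PySem.List.pyGetD y j 0)) : Int) := by
    rw [pv_foldl_cnt (fun j => v < PySem.List.pyGetD y j 0) ind 0]; ring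
  have h2 : ind.countP (fun j => decide (v < PySem.List.pyGetD y j 0))
      = m.countP (fun w => decide (v < w)) := by
    rw [hm, List.countP_map]; rfl
  have h3 : ys.countP (fun w => decide (v < w)) = m.countP (fun w => decide (v < w)) :=
    (PySem.List.sorted_perm m (fun v => v) true).countP_eq _
  have hpair : ys.Pairwise (fun a b => b ≤ a) := PySem.List.sorted_pairwise_rev m (fun v => v)
  have h4 : ((PySem.List.enumerate ys 0).foldl
        (fun d kv => if d.contains kv.2 then d else d.insert kv.2 kv.1) PySem.Dict.empty).getD v 0
      = (0 : Int) + (ys.idxOf v : Int) :=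
    pv_fo_first ys 0 PySem.Dict.empty v hvys (by simp)
  rw [h1, h2, h4, pv_idxOf_countP ys hpair v hvys, h3]
  ring

-- both bodies coincide for any shared index list
theorem pv_core (x y : List Int) (ind : List Int) (mn : Int) :
    ind.foldl (fun fp i =>
      if (ind.foldl (fun cnt j => if PySem.List.pyGetD y i 0 < PySem.List.pyGetD y j 0 then cnt + 1 else cnt) (0 : Int)) < mn
      then fp ++ [PySem.List.pyGetD x i 0] else fp) []
    = (ind.filter (fun i => decide (
        ((PySem.List.enumerate (PySem.List.sorted (ind.map (fun i => PySem.List.pyGetD y i 0)) (fun v => v) true) 0).foldl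
          (fun d kv => if d.contains kv.2 then d else d.insert kv.2 kv.1) PySem.Dict.empty).getD (PySem.List.pyGetD y i 0) 0 < mn))).map
        (fun i => PySem.List.pyGetD x i 0) := by
  rw [pv_foldl_app_if
        (fun i => (ind.foldl (fun cnt j => if PySem.List.pyGetD y i 0 < PySem.List.pyGetD y j 0 then cnt + 1 else cnt) (0 : Int)) < mn)
        (fun i => PySem.List.pyGetD x i 0) ind []]
  rw [List.nil_append]
  apply congrArg
  apply List.filter_congr
  intro i hi
  rw [pv_cnt_eq y ind i hi]

theorem pv_main (peaks x y : List Int) (mn : Int) :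
    filter_peaks peaks x y mn = filter_peaks_alt peaks x y mn := by
  have hpos : ∀ p : Int,
      ((PySem.List.enumerate x 0).foldl (fun d jv => d.insert jv.2 (d.getD jv.2 [] ++ [jv.1])) PySem.Dict.empty).getD p []
      = pvH x p := by
    intro p
    rw [pv_pos_getD (PySem.List.enumerate x 0) PySem.Dict.empty p]
    rw [PySem.Dict.getD_empty, List.nil_append, pv_enum_filt]
  show (collect_indexes_of_peaks peaks x).foldl _ [] = _
  rw [pv_collect_eq]
  show _ = (((peaks.flatMap (fun p =>
      ((PySem.List.enumerate x 0).foldl (fun d jv => d.insert jv.2 (d.getD jv.2 [] ++ [jv.1])) PySem.Dict.empty).getD p []))).filter _).map _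
  have hind : peaks.flatMap (fun p =>
      ((PySem.List.enumerate x 0).foldl (fun d jv => d.insert jv.2 (d.getD jv.2 [] ++ [jv.1])) PySem.Dict.empty).getD p [])
      = peaks.flatMap (pvH x) := by
    apply List.flatMap_congr
    intro p _
    exact hpos p
  rw [hind]
  exact pv_core x y (peaks.flatMap (pvH x)) mn

-- ===== VERDICT (by name: the statement is the Claim_ definition above) =====
theorem filter_peaks_spec : Claim_equal_filter_peaks := by
  intro peaks x y mn _ _
  unfold Spec_filter_peaks
  exact pv_main peaks x y mn
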